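-- pv_equiv track=rewrite | github.com/Sun1203/Learning-Algorithmic-problem | Programers/algo20.py | solution
-- ===== SOURCE A (Python) =====
-- def solution(name):
--     answer = 0
--     min_move = len(name) -1
--     next = 0
--     for x, i in enumerate(name):
--         answer += min(ord(name[x]) - ord('A'), ord("Z") - ord(name[x]) + 1)
--
--         next = x + 1
--         while next < len(name) and name[next] == 'A':
--             next += 1
--
--             min_move = min(min_move, x + x + len(name) - next)
--     answer += min_move
--     return answer
-- ===== SOURCE B (Python) =====
-- def solution(name):
--     n = len(name)
--     nxt = n          # first index >= current x whose letter is not 'A' (n if none)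
--     min_move = n - 1
--     for x in range(n - 1, 0, -1):      # one backward pass: O(1) per index
--         if name[x] != 'A':
--             nxt = x
--         min_move = min(min_move, 2 * (x - 1) + n - nxt)
--     answer = sum(min(ord(c) - ord('A'), ord('Z') - ord(c) + 1) for c in name)
--     return answer + min_move
-- ===== Notes on version B (the rewrite author's own statement) =====
-- stated objective: alternative
-- what changed: A rescans the run of consecutive capital-A letters following every index with an inner while loop; B instead makes one backward pass that carries the index of the next different letter (O(1) per index) and sums the letter costs in a separate single fold.
import Mathlib
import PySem

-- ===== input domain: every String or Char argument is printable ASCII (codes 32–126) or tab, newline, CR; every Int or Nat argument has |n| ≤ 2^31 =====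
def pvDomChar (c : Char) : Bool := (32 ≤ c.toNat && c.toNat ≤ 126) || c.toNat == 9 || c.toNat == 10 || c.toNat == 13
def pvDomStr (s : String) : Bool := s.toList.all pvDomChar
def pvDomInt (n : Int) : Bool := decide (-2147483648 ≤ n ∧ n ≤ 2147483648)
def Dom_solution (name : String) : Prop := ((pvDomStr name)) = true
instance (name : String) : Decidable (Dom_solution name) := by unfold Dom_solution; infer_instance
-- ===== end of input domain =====

-- B replaces A's per-index inner while-rescans of the following run of capital-A letters
-- by a single backward pass that carries the index of the next other letter (objective: alternative).

-- ===== PORT A =====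
-- A's inner `while next < len(name) and name[next] == 'A'` loop; returns (next, min_move)
def solWhile (cs : List Char) (x : Int) (next : Int) (mm : Int) : Int × Int :=
  if h : next < (cs.length : Int) ∧ PySem.List.pyGetD cs next ' ' = 'A' then
    solWhile cs x (next + 1) (min mm (x + x + (cs.length : Int) - (next + 1)))
  else (next, mm)
termination_by ((cs.length : Int) - next).toNat
decreasing_by omega

def solution (name : String) : Int :=
  let cs := name.toList
  let res := (PySem.List.enumerate cs 0).foldl
    (fun (st : Int × Int) xi =>
      let c := PySem.List.pyGetD cs xi.1 ' '
      ((st.1 + min ((c.toNat : Int) - 65) (90 - (c.toNat : Int) + 1)),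
       (solWhile cs xi.1 (xi.1 + 1) st.2).2))
    (0, (cs.length : Int) - 1)
  res.1 + res.2

-- ===== PORT B =====
def solution_alt (name : String) : Int :=
  let cs := name.toList
  let n : Int := cs.length
  let st := (PySem.List.pyRange (n - 1) 0 (-1)).foldl
    (fun (st : Int × Int) x =>
      let nxt := if PySem.List.pyGetD cs x ' ' ≠ 'A' then x else st.1
      (nxt, min st.2 (2 * (x - 1) + n - nxt)))
    (n, n - 1)
  let answer := cs.foldl
    (fun a c => a + min ((c.toNat : Int) - 65) (90 - (c.toNat : Int) + 1)) 0
  answer + st.2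

-- ===== PRECONDITION & SPEC =====
def Spec_solution (name : String) (out : Int) : Prop := out = solution_alt name
instance (name : String) (out : Int) : Decidable (Spec_solution name out) := by unfold Spec_solution; infer_instance

-- ===== CLAIM (what is proved, stated in full; the proofs are below) =====
def Claim_equal_solution : Prop := ∀ (name : String), Dom_solution name → Spec_solution name (solution name)

-- ===== LEMMAS AND PROOFS =====

-- first index ≥ j holding a letter other than 'A' (cs.length if none)
def Fnext (cs : List Char) (j : Nat) : Nat :=
  if h : j < cs.length then (if cs[j] = 'A' then Fnext cs (j+1) else j) else cs.length
termination_by cs.length - j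

-- candidate move count contributed by index k
def gCand (cs : List Char) (k : Nat) : Int :=
  2 * (k : Int) + (cs.length : Int) - (Fnext cs (k+1) : Int)

-- cs.getD never matters beyond the length, and Fnext stays put at the length
lemma Fnext_ge (cs : List Char) (j : Nat) (hj : j ≤ cs.length) : j ≤ Fnext cs j := by
  unfold Fnext
  split
  · split
    · have := Fnext_ge cs (j+1) (by omega); omega
    · exact le_refl j
  · omega
termination_by cs.length - j

lemma Fnext_of_ge (cs : List Char) (j : Nat) (h : cs.length ≤ j) : Fnext cs j = cs.length := by
  unfold Fnext
  split
  · omega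
  · rfl

lemma Fnext_step (cs : List Char) (j : Nat) (hj : j < cs.length) :
    Fnext cs j = if cs.getD j ' ' = 'A' then Fnext cs (j+1) else j := by
  conv_lhs => rw [Fnext]
  rw [dif_pos hj, List.getD_eq_getElem]

-- characterization of A's inner while loop
lemma solWhile_char (cs : List Char) (x mm : Int) (j : Nat) (hj : j ≤ cs.length) :
    solWhile cs x (j : Int) mm =
      ((Fnext cs j : Int),
       if j < cs.length ∧ cs.getD j ' ' = 'A' then
         min mm (x + x + (cs.length : Int) - (Fnext cs j : Int)) else mm) := by
  rw [solWhile]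
  by_cases hc : j < cs.length ∧ cs.getD j ' ' = 'A'
  · rw [dif_pos ⟨by exact_mod_cast hc.1, by rw [PySem.List.pyGetD_natCast]; exact hc.2⟩]
    have hcast : ((j : Int) + 1) = ((j + 1 : Nat) : Int) := by push_cast; ring
    rw [hcast, solWhile_char cs x _ (j+1) (by omega)]
    have hF : Fnext cs j = Fnext cs (j+1) := by
      rw [Fnext_step cs j hc.1, if_pos hc.2]
    by_cases hc2 : j + 1 < cs.length ∧ cs.getD (j+1) ' ' = 'A'
    · rw [if_pos hc2, if_pos hc, hF]
      have hF2 : Fnext cs (j+1) = Fnext cs (j+2) := by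
        rw [Fnext_step cs (j+1) hc2.1, if_pos hc2.2]
      have hge : j + 2 ≤ Fnext cs (j+2) := Fnext_ge cs (j+2) (by omega)
      refine Prod.ext rfl ?_
      simp only
      omega
    · rw [if_neg hc2, if_pos hc, hF]
      have hF1 : Fnext cs (j+1) = j + 1 := by
        by_cases h1 : j + 1 < cs.length
        · rw [Fnext_step cs (j+1) h1, if_neg (fun hA => hc2 ⟨h1, hA⟩)]
        · rw [Fnext_of_ge cs (j+1) (by omega)]; omega
      refine Prod.ext rfl ?_
      simp only [hF1]
  · rw [dif_neg (by
      intro hc'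
      exact hc ⟨by exact_mod_cast hc'.1, by
        have := hc'.2; rwa [PySem.List.pyGetD_natCast] at this⟩)]
    have hF : Fnext cs j = j := by
      by_cases h1 : j < cs.length
      · rw [Fnext_step cs j h1, if_neg (fun hA => hc ⟨h1, hA⟩)]
      · rw [Fnext_of_ge cs j (by omega)]; omega
    rw [if_neg hc, hF]
termination_by cs.length - j
decreasing_by omega

-- per-index step of A's outer loop, rewritten through gCand
lemma Astep (cs : List Char) (k : Nat) (hk : k < cs.length) (mm : Int)
    (hmm : mm ≤ (cs.length : Int) - 1) :
    (solWhile cs (k : Int) ((k : Int) + 1) mm).2 = min mm (gCand cs k) := by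
  have hcast : ((k : Int) + 1) = ((k + 1 : Nat) : Int) := by push_cast; ring
  rw [hcast, solWhile_char cs (k : Int) mm (k + 1) (by omega)]
  unfold gCand
  by_cases hc : k + 1 < cs.length ∧ cs.getD (k+1) ' ' = 'A'
  · rw [if_pos hc]
    simp only
    congr 1
    ring
  · rw [if_neg hc]
    simp only
    rcases Nat.lt_or_ge (k+1) cs.length with h1 | h1
    · have hF : Fnext cs (k+1) = k + 1 := by
        rw [Fnext_step cs (k+1) h1, if_neg (fun hA => hc ⟨h1, hA⟩)]
      rw [hF]; omega
    · rw [Fnext_of_ge cs (k+1) h1]; omega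

lemma foldl_min_le_init (g : Nat → Int) (l : List Nat) (a : Int) :
    l.foldl (fun mm k => min mm (g k)) a ≤ a := by
  induction l generalizing a with
  | nil => simp
  | cons k l ih => exact le_trans (ih (min a (g k))) (min_le_left _ _)

lemma foldl_min_init_min (g : Nat → Int) (l : List Nat) (a b : Int) :
    l.foldl (fun mm k => min mm (g k)) (min a b) =
      min (l.foldl (fun mm k => min mm (g k)) a) b := by
  induction l generalizing a with
  | nil => simp
  | cons k l ih =>
    simp only [List.foldl_cons]
    rw [min_right_comm a b (g k), ih]

lemma foldl_min_reverse (g : Nat → Int) (l : List Nat) (a : Int) :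
    l.reverse.foldl (fun mm k => min mm (g k)) a =
      l.foldl (fun mm k => min mm (g k)) a := by
  induction l generalizing a with
  | nil => rfl
  | cons k l ih =>
    simp only [List.reverse_cons, List.foldl_append, List.foldl_cons, List.foldl_nil,
      List.foldl_cons]
    rw [ih, foldl_min_init_min]

-- A's outer loop, mm component, as a min-fold over gCand
lemma Afold (cs : List Char) (l : List Nat) (mm : Int)
    (hl : ∀ k ∈ l, k < cs.length) (hmm : mm ≤ (cs.length : Int) - 1) :
    l.foldl (fun (mm : Int) (k : Nat) => (solWhile cs (k : Int) ((k : Int) + 1) mm).2) mm =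
      l.foldl (fun mm k => min mm (gCand cs k)) mm := by
  induction l generalizing mm with
  | nil => rfl
  | cons k l ih =>
    simp only [List.foldl_cons]
    rw [Astep cs k (hl k (List.mem_cons_self)) mm hmm]
    exact ih _ (fun k hk => hl k (List.mem_cons_of_mem _ hk))
      (le_trans (min_le_left _ _) hmm)

lemma foldl_prod_split {α : Type} (l : List α) (f : Int → α → Int) (h : Int → α → Int)
    (a m : Int) :
    l.foldl (fun st x => (f st.1 x, h st.2 x)) (a, m) = (l.foldl f a, l.foldl h m) := by
  induction l generalizing a m with
  | nil => rfl
  | cons x l ih => simp only [List.foldl_cons]; exact ih _ _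

-- B's backward pass computes the same min-fold (in reverse order)
lemma Bfold (cs : List Char) (x : Nat) (hx : x ≤ cs.length) (mm : Int) :
    ((PySem.List.pyRange (x : Int) 0 (-1)).foldl
        (fun (st : Int × Int) y =>
          (if PySem.List.pyGetD cs y ' ' ≠ 'A' then y else st.1,
           min st.2 (2 * (y - 1) + (cs.length : Int) -
             (if PySem.List.pyGetD cs y ' ' ≠ 'A' then y else st.1))))
        ((Fnext cs (x + 1) : Int), mm)).2 =
      (List.range x).reverse.foldl (fun mm k => min mm (gCand cs k)) mm := by
  induction x generalizing mm with
  | zero =>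
    rw [PySem.List.pyRange_neg_one_eq_nil (by norm_num)]
    simp
  | succ x ih =>
    rw [PySem.List.pyRange_neg_one_cons (by exact_mod_cast Nat.succ_pos x)]
    have hcast : ((x + 1 : Nat) : Int) - 1 = (x : Int) := by push_cast; ring
    rw [hcast]
    simp only [List.foldl_cons]
    have hn : (if PySem.List.pyGetD cs ((x + 1 : Nat) : Int) ' ' ≠ 'A'
          then ((x + 1 : Nat) : Int) else ((Fnext cs (x + 1 + 1) : Nat) : Int))
        = ((Fnext cs (x + 1) : Nat) : Int) := by
      rw [PySem.List.pyGetD_natCast]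
      rcases Nat.lt_or_ge (x+1) cs.length with h1 | h1
      · rw [Fnext_step cs (x+1) h1]
        by_cases hA : cs.getD (x+1) ' ' = 'A'
        · rw [if_neg (by simpa using hA), if_pos hA]
        · rw [if_pos hA, if_neg hA]
      · rw [List.getD_eq_default _ _ h1, if_pos (by decide),
          Fnext_of_ge cs (x+1) h1]
        omega
    rw [hn, hcast]
    rw [show min mm (2 * (x : Int) + (cs.length : Int) - ((Fnext cs (x + 1) : Nat) : Int))
          = min mm (gCand cs x) from by unfold gCand; ring_nf]
    rw [ih (by omega)]
    rw [List.range_succ, List.reverse_append]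
    simp

lemma len_toInt (cs : List Char) : PySem.List.len cs = (cs.length : Int) := by
  simp [PySem.List.len]

theorem solution_spec : Claim_equal_solution := by
  intro name _
  unfold Spec_solution solution solution_alt
  simp only []
  set cs := name.toList with hcs
  rw [PySem.List.enumerate_eq_map_pyRange cs ' ', List.foldl_map]
  simp only []
  rw [foldl_prod_split _
        (fun (a : Int) (y : Int) => a + min (((PySem.List.pyGetD cs y ' ').toNat : Int) - 65)
          (90 - ((PySem.List.pyGetD cs y ' ').toNat : Int) + 1))
        (fun (m : Int) (y : Int) => (solWhile cs y (y + 1) m).2)]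
  simp only []
  rw [PySem.List.foldl_pyRange_zero_pyGetD cs ' '
        (fun (a : Int) (c : Char) => a + min ((c.toNat : Int) - 65) (90 - (c.toNat : Int) + 1)) 0]
  rw [len_toInt, PySem.List.pyRange_zero_natCast, List.foldl_map]
  rw [Afold cs (List.range cs.length) ((cs.length : Int) - 1)
        (fun k hk => List.mem_range.mp hk) (le_refl _)]
  rcases Nat.eq_zero_or_pos cs.length with h0 | hpos
  · rw [h0]
    rw [PySem.List.pyRange_neg_one_eq_nil (by norm_num)]
    simp
  · obtain ⟨m, hm⟩ : ∃ m, cs.length = m + 1 := ⟨cs.length - 1, by omega⟩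
    have hB := Bfold cs m (by omega) (m : Int)
    rw [Fnext_of_ge cs (m + 1) (by omega)] at hB
    have hrange : ((cs.length : Nat) : Int) - 1 = (m : Int) := by rw [hm]; push_cast; ring
    rw [hrange, hB, foldl_min_reverse]
    rw [hm, List.range_succ, List.foldl_append]
    simp only [List.foldl_cons, List.foldl_nil]
    congr 1
    have hle : (List.range m).foldl (fun mm k => min mm (gCand cs k)) (m : Int) ≤ (m : Int) :=
      foldl_min_le_init _ _ _
    have hg : (m : Int) ≤ gCand cs m := by
      unfold gCand
      rw [Fnext_of_ge cs (m + 1) (by omega), hm]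
      push_cast
      omega
    omega
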